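-- pv_equiv track=rewrite | github.com/marcostranisci/WikiBio | src/converting_gum.py | sentence_identification
-- ===== SOURCE A (Python) =====
-- def sentence_identification(a_list):
--     labelsWsents = list()
--     i = 0
--     for line in a_list:
--         if line[0]=='.':
--             labelsWsents.append((line[0],line[1],i))
--             i+=1
--         else:
--             labelsWsents.append((line[0],line[1],i))
--
--     return labelsWsents
-- ===== SOURCE B (Python) =====
-- def sentence_identification(a_list):
--     # pass 1: build the table of pre-increment sentence indices (running count of previous '.' labels)
--     indices = []
--     i = 0
--     for line in a_list:
--         indices.append(i)
--         if line[0] == '.':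
--             i += 1
--     # pass 2: zip lines with their indices
--     return [(first, second, idx) for (first, second), idx in zip(a_list, indices)]
-- ===== Notes on version B (the rewrite author's own statement) =====
-- stated objective: alternative
-- what changed: Replaced the single stateful append-loop with a two-pass build-index-table-then-zip decomposition: first compute each line's sentence index as a running count of preceding '.' labels, then map the zip to tuples.
import Mathlib
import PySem

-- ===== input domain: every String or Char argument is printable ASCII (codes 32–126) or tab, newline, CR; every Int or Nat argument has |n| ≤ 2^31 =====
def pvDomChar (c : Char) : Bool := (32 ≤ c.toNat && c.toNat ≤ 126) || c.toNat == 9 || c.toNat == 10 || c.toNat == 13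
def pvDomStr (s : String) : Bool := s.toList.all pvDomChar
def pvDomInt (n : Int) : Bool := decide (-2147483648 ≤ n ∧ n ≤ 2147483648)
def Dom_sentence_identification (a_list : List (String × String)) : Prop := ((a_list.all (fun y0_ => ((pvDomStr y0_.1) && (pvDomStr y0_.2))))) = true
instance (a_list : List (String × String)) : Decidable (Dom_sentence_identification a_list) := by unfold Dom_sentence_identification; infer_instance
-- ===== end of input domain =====

-- B replaces A's single stateful loop by a two-pass decomposition (index table, then zip); same cost, alternative structure.


-- ===== PORT A =====
-- A: one loop carrying (labelsWsents, i); both branches append (line[0], line[1], i), the '.' branch then increments i.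
def sentence_identification (a_list : List (String × String)) : List (String × String × Int) :=
  (a_list.foldl
    (fun (st : List (String × String × Int) × Int) line =>
      if line.1 == "." then (st.1 ++ [(line.1, line.2, st.2)], st.2 + 1)
      else (st.1 ++ [(line.1, line.2, st.2)], st.2))
    ([], 0)).1

-- ===== PORT B =====
-- B pass 1: the table of pre-increment indices (running count of preceding '.' labels).
def siIndices : List (String × String) → Int → List Int
  | [], _ => []
  | line :: rest, i => i :: siIndices rest (if line.1 == "." then i + 1 else i)

-- B pass 2: zip lines with their indices and map to tuples.
def sentence_identification_alt (a_list : List (String × String)) : List (String × String × Int) :=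
  (a_list.zip (siIndices a_list 0)).map (fun p => (p.1.1, p.1.2, p.2))

-- ===== PRECONDITION & SPEC =====
def Spec_sentence_identification (a_list : List (String × String)) (out : List (String × String × Int)) : Prop := out = sentence_identification_alt a_list
instance (a_list : List (String × String)) (out : List (String × String × Int)) : Decidable (Spec_sentence_identification a_list out) := by unfold Spec_sentence_identification; infer_instance

-- ===== CLAIM (what is proved, stated in full; the proofs are below) =====
def Claim_equal_sentence_identification : Prop := ∀ (a_list : List (String × String)), Dom_sentence_identification a_list → Spec_sentence_identification a_list (sentence_identification a_list)

-- ===== LEMMAS AND PROOFS =====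
-- Loop invariant: the fold starting from (acc, i) produces acc ++ the zip-with-indices image started at i.
theorem si_fold_eq (l : List (String × String)) :
    ∀ (acc : List (String × String × Int)) (i : Int),
      (l.foldl
        (fun (st : List (String × String × Int) × Int) line =>
          if line.1 == "." then (st.1 ++ [(line.1, line.2, st.2)], st.2 + 1)
          else (st.1 ++ [(line.1, line.2, st.2)], st.2))
        (acc, i)).1
      = acc ++ (l.zip (siIndices l i)).map (fun p => (p.1.1, p.1.2, p.2)) := by
  induction l with
  | nil => intro acc i; simp [siIndices]
  | cons hd tl ih =>
    intro acc i
    by_cases h : hd.1 = "."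
    · rw [List.foldl_cons, if_pos (by simp [h]), ih]
      simp [siIndices, h]
    · rw [List.foldl_cons, if_neg (by simp [h]), ih]
      simp [siIndices, h]

-- ===== VERDICT (by name: the statement is the Claim_ definition above) =====
theorem sentence_identification_spec : Claim_equal_sentence_identification := by
  intro a_list _
  unfold Spec_sentence_identification sentence_identification sentence_identification_alt
  simpa using si_fold_eq a_list [] 0
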